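-- pv_equiv track=rewrite | github.com/ishandutta2007/codeforces | ali_pi/normal/946/B.py | huh
-- ===== SOURCE A (Python) =====
-- def huh(a, b):
--     if a * b == 0:
--         return a, b
--     elif a >= 2 * b:
--         return huh(a % (2 * b), b)
--     elif b >= 2 * a:
--         return huh(a, b % (2 * a))
--     else:
--         return a, b
-- ===== SOURCE B (Python) =====
-- def _step(a, b):
--     """One reduction of A's relation, or None when the pair is final."""
--     if a == 0 or b == 0:
--         return None
--     m = 2 * b
--     if a >= m:
--         return (a % m, b)
--     n = 2 * a
--     if b >= n:
--         return (a, b % n)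
--     return None
--
-- def huh(a, b):
--     state = (a, b)
--     while True:
--         nxt = _step(*state)
--         if nxt is None:
--             return state
--         state = nxt
-- ===== Notes on version B (the rewrite author's own statement) =====
-- stated objective: alternative
-- what changed: B factors the computation into a pure single-step function returning Optional[pair] (with the zero test split into 'a == 0 or b == 0' and each double saved once) plus a generic driver loop that iterates it to its fixed point, replacing A's self-recursive three-way branch.
import Mathlib
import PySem

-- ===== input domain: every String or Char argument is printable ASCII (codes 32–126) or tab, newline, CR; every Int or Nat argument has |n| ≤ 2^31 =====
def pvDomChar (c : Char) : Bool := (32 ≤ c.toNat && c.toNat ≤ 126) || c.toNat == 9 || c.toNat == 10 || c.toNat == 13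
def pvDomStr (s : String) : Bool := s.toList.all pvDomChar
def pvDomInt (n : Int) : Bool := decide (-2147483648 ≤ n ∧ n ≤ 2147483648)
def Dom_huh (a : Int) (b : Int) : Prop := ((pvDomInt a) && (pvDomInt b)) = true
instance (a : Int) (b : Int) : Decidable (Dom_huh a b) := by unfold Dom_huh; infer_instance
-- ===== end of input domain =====

-- B factors A's self-recursion into a pure Option-returning step function plus a
-- generic fixed-point driver loop (alternative decomposition); equal on Pre_.

-- ===== PORT A =====
-- A is tail-recursive; ported with a fuel counter (totality device only):
-- a.natAbs + b.natAbs + 1 steps always suffice on inputs where the Python returns.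
def huhGo : Nat → Int → Int → Int × Int
  | 0, a, b => (a, b)
  | f + 1, a, b =>
    if a * b = 0 then (a, b)
    else if a ≥ 2 * b then huhGo f (PySem.Int.mod a (2 * b)) b
    else if b ≥ 2 * a then huhGo f a (PySem.Int.mod b (2 * a))
    else (a, b)

def huh (a : Int) (b : Int) : Int × Int := huhGo (a.natAbs + b.natAbs + 1) a b

-- ===== PORT B =====
-- _step : one reduction, or none when the pair is final.
def huhStep (a : Int) (b : Int) : Option (Int × Int) :=
  if a = 0 ∨ b = 0 then none
  else
    let m := 2 * b
    if a ≥ m then some (PySem.Int.mod a m, b)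
    else
      let n := 2 * a
      if b ≥ n then some (a, PySem.Int.mod b n)
      else none

-- the driver: iterate huhStep to its fixed point (fuel is the same totality device).
def huhDrive : Nat → Int × Int → Int × Int
  | 0, s => s
  | f + 1, s =>
    match huhStep s.1 s.2 with
    | none => s
    | some t => huhDrive f t

def huh_alt (a : Int) (b : Int) : Int × Int := huhDrive (a.natAbs + b.natAbs + 1) (a, b)

-- ===== PRECONDITION & SPEC =====
-- Pre_ excludes exactly the inputs on which the Python A recurses forever (RecursionError):
-- nonzero pairs with a negative component, except the families where a Python modulo chain
-- hits 0 (a > 0 > b with 2b ∣ a; a = 2b < 0; a < 0 < b with 2a ∣ b or 4a ∣ 2b - a).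
def Pre_huh (a : Int) (b : Int) : Prop :=
  a = 0 ∨ b = 0 ∨ (0 < a ∧ 0 < b)
    ∨ (0 < a ∧ b < 0 ∧ (2 * b) ∣ a)
    ∨ (a < 0 ∧ b < 0 ∧ a = 2 * b)
    ∨ (a < 0 ∧ 0 < b ∧ ((2 * a) ∣ b ∨ (4 * a) ∣ (2 * b - a)))
instance (a : Int) (b : Int) : Decidable (Pre_huh a b) := by unfold Pre_huh; infer_instance

def pvWitness_huh : Int × Int := (7, 3)

def Spec_huh (a : Int) (b : Int) (out : Int × Int) : Prop := out = huh_alt a b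
instance (a : Int) (b : Int) (out : Int × Int) : Decidable (Spec_huh a b out) := by unfold Spec_huh; infer_instance

-- ===== CLAIM (what is proved, stated in full; the proofs are below) =====
def Claim_equal_huh : Prop := ∀ (a : Int) (b : Int), Dom_huh a b → Pre_huh a b → Spec_huh a b (huh a b)

-- ===== LEMMAS AND PROOFS =====
-- A's recursive body and B's step-then-drive take the same step, so they agree for every fuel.
theorem huhGo_eq_drive : ∀ (f : Nat) (a b : Int), huhGo f a b = huhDrive f (a, b) := by
  intro f
  induction f with
  | zero => intro a b; rfl
  | succ f ih =>
    intro a b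
    simp only [huhGo, huhDrive, huhStep, mul_eq_zero]
    by_cases h0 : a = 0 ∨ b = 0
    · simp [h0]
    · simp only [h0, if_false]
      split_ifs with h1 h2
      · exact ih _ _
      · exact ih _ _
      · rfl

-- ===== VERDICT (by name: the statement is the Claim_ definition above) =====
theorem huh_spec : Claim_equal_huh := by
  intro a b _ _
  unfold Spec_huh huh huh_alt
  exact huhGo_eq_drive _ a b
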